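-- pv_equiv track=rewrite | github.com/Mezghenna-Mohanned/Chess-Engine-Jinxy | KnightBFS.py | bfs_knight_to_king
-- ===== SOURCE A (Python) =====
-- from collections import deque
--
-- columns = ['a', 'b', 'c', 'd', 'e', 'f', 'g', 'h']
--
-- knight_moves = [(2, 1), (2, -1), (-2, 1), (-2, -1), (1, 2), (1, -2), (-1, 2), (-1, -2)]
--
-- def get_valid_knight_moves(knight_position):
--     valid_moves = []
--     col_index = columns.index(knight_position[0])
--     row_index = int(knight_position[1]) - 1
--
--     for move in knight_moves:
--         new_col_index = col_index + move[0]
--         new_row_index = row_index + move[1]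
--
--         if 0 <= new_col_index < 8 and 0 <= new_row_index < 8:
--             new_position = f"{columns[new_col_index]}{new_row_index + 1}"
--             valid_moves.append(new_position)
--
--     return valid_moves
--
-- def bfs_knight_to_king(knight_position, king_position):
--     queue = deque([(knight_position, [knight_position])])
--     visited = set()
--
--     while queue:
--         current_position, path = queue.popleft()
--
--         if current_position == king_position:
--             return path
--
--         visited.add(current_position)
--
--         for move in get_valid_knight_moves(current_position):
--             if move not in visited:
--                 queue.append((move, path + [move]))
--
--     return None
-- ===== SOURCE B (Python) =====
-- from collections import deque
--
-- columns = ['a', 'b', 'c', 'd', 'e', 'f', 'g', 'h']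
--
-- knight_moves = [(2, 1), (2, -1), (-2, 1), (-2, -1), (1, 2), (1, -2), (-1, 2), (-1, -2)]
--
-- def get_valid_knight_moves(knight_position):
--     valid_moves = []
--     col_index = columns.index(knight_position[0])
--     row_index = int(knight_position[1]) - 1
--
--     for move in knight_moves:
--         new_col_index = col_index + move[0]
--         new_row_index = row_index + move[1]
--
--         if 0 <= new_col_index < 8 and 0 <= new_row_index < 8:
--             new_position = f"{columns[new_col_index]}{new_row_index + 1}"
--             valid_moves.append(new_position)
--
--     return valid_moves
--
-- def bfs_knight_to_king(knight_position, king_position):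
--     if knight_position == king_position:
--         return [knight_position]
--     parent = {}
--     visited = {knight_position}
--     queue = deque([knight_position])
--     found = False
--     while queue:
--         current = queue.popleft()
--         if current == king_position:
--             found = True
--             break
--         for move in get_valid_knight_moves(current):
--             if move not in visited:
--                 visited.add(move)
--                 parent[move] = current
--                 queue.append(move)
--     if not found:
--         return None
--     node = king_position
--     path = [node]
--     while node != knight_position:
--         node = parent[node]
--         path.append(node)
--     return list(reversed(path))
-- ===== Notes on version B (the rewrite author's own statement) =====
-- stated objective: alternative
-- what changed: A's BFS carries a full copy of the path in every queue entry and marks visited only at dequeue time (so the queue holds duplicate entries that are re-expanded); B runs BFS over bare squares with visited marked at enqueue time and a parent dictionary set on first discovery, then reconstructs the identical shortest path by following parent pointers from the king back to the knight and reversing.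
import Mathlib
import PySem

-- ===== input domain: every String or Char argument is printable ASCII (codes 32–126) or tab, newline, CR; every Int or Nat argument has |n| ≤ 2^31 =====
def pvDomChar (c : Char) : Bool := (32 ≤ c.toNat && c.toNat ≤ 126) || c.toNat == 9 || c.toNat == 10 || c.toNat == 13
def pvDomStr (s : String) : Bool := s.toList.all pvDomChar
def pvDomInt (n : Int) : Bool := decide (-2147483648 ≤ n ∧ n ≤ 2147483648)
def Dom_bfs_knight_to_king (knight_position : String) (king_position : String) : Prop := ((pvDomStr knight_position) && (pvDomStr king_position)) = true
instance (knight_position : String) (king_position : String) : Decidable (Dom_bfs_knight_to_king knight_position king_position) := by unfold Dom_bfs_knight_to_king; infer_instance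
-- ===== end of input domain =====

-- B replaces A's BFS queue of (position, full-path) pairs with dequeue-time visited marking
-- by a parent-dict BFS (visited marked at enqueue, no duplicate queue entries) plus a
-- back-to-front path reconstruction; objective: alternative decomposition, same return value.

-- ===== PORT A =====
-- shared module context: columns, knight_moves, get_valid_knight_moves

def columnsL : List Char := ['a','b','c','d','e','f','g','h']

def knightMovesL : List (Int × Int) := [(2,1),(2,-1),(-2,1),(-2,-1),(1,2),(1,-2),(-1,2),(-1,-2)]

-- f"{columns[new_col_index]}{new_row_index + 1}" (indices guarded in range by the if)
def mkSq (nc nr : Int) : String := String.mk (columnsL.getD nc.toNat 'a' :: PySem.Int.toChars (nr + 1))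

def vmGuard (ci ri : Int) (mv : Int × Int) : Bool :=
  decide (0 ≤ ci + mv.1 ∧ ci + mv.1 < 8 ∧ 0 ≤ ri + mv.2 ∧ ri + mv.2 < 8)

-- the for-loop body of get_valid_knight_moves
def validMoves (ci ri : Int) : List String :=
  knightMovesL.foldl (fun acc mv =>
    if vmGuard ci ri mv then acc ++ [mkSq (ci + mv.1) (ri + mv.2)] else acc) []

-- get_valid_knight_moves; none = the ValueError/IndexError the Python raises on a malformed square
def get_valid_knight_moves (pos : String) : Option (List String) :=
  match PySem.Str.pyGet? pos 0 with
  | none => none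
  | some c =>
    match PySem.List.index? columnsL c with
    | none => none
    | some ci =>
      match PySem.Str.pyGet? pos 1 with
      | none => none
      | some r =>
        match PySem.Int.ofChars? [r] with
        | none => none
        | some rv => some (validMoves (ci : Int) (rv - 1))

-- the 64 board squares every generated move lies in
def squaresL : List String :=
  (List.range 8).flatMap (fun ci => (List.range 8).map (fun ri => String.mk [columnsL.getD ci 'a', Char.ofNat (49 + ri)]))

def univL (kn : String) : List String := PySem.List.dedup (kn :: squaresL)

-- ---- facts the loop's termination argument needs (cited in decreasing_by / the invariant constructors) ----

theorem validMoves_eq (ci ri : Int) :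
    validMoves ci ri = (knightMovesL.filter (vmGuard ci ri)).map (fun mv => mkSq (ci + mv.1) (ri + mv.2)) :=
  PySem.List.foldl_append_if (vmGuard ci ri) _ knightMovesL []

theorem length_validMoves_le (ci ri : Int) : (validMoves ci ri).length ≤ 8 := by
  rw [validMoves_eq, List.length_map]
  calc (knightMovesL.filter (vmGuard ci ri)).length ≤ knightMovesL.length := List.length_filter_le _ _
    _ = 8 := rfl

theorem toChars_digit (nr : Int) (h0 : 0 ≤ nr) (h8 : nr < 8) :
    PySem.Int.toChars (nr + 1) = [Char.ofNat (49 + nr.toNat)] := by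
  interval_cases nr <;> rfl

theorem mkSq_mem_squares (nc nr : Int) (h1 : 0 ≤ nc) (h2 : nc < 8) (h3 : 0 ≤ nr) (h4 : nr < 8) :
    mkSq nc nr ∈ squaresL := by
  unfold squaresL
  rw [List.mem_flatMap]
  refine ⟨nc.toNat, by simp [List.mem_range]; omega, ?_⟩
  rw [List.mem_map]
  refine ⟨nr.toNat, by simp [List.mem_range]; omega, ?_⟩
  rw [mkSq, toChars_digit nr h3 h4]

theorem validMoves_subset_squares (ci ri : Int) : ∀ m ∈ validMoves ci ri, m ∈ squaresL := by
  intro m hm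
  rw [validMoves_eq, List.mem_map] at hm
  obtain ⟨mv, hmv, rfl⟩ := hm
  have hg := (List.mem_filter.mp hmv).2
  rw [vmGuard, decide_eq_true_iff] at hg
  exact mkSq_mem_squares _ _ hg.1 hg.2.1 hg.2.2.1 hg.2.2.2

theorem gvm_square_isSome : ∀ s ∈ squaresL, (get_valid_knight_moves s).isSome := by decide

theorem gvm_some_props {pos : String} {moves : List String}
    (h : get_valid_knight_moves pos = some moves) :
    (∀ m ∈ moves, m ∈ squaresL) ∧ moves.length ≤ 8 := by
  unfold get_valid_knight_moves at h
  split at h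
  · exact absurd h (by simp)
  split at h
  · exact absurd h (by simp)
  split at h
  · exact absurd h (by simp)
  split at h
  · exact absurd h (by simp)
  obtain rfl := Option.some.inj h
  exact ⟨validMoves_subset_squares _ _, length_validMoves_le _ _⟩

theorem length_univ_le (kn : String) : (univL kn).length ≤ 65 := by
  have := PySem.Set.length_ofList_le (kn :: squaresL)
  simpa [univL, PySem.List.dedup] using this

theorem mem_univ_of_square {kn m : String} (h : m ∈ squaresL) : m ∈ univL kn := by
  rw [univL, PySem.List.dedup, PySem.Set.mem_ofList]; exact List.mem_cons_of_mem _ h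

theorem self_mem_univ (kn : String) : kn ∈ univL kn := by
  rw [univL, PySem.List.dedup, PySem.Set.mem_ofList]; exact List.mem_cons_self

theorem nodup_length_le {l u : List String} (hn : l.Nodup) (hs : ∀ y ∈ l, y ∈ u) :
    l.length ≤ u.length := by
  classical
  calc l.length = l.toFinset.card := (List.toFinset_card_of_nodup hn).symm
    _ ≤ u.toFinset.card := Finset.card_le_card (by intro y hy; rw [List.mem_toFinset] at *; exact hs y (by simpa using hy))
    _ ≤ u.length := u.toFinset_card_le

-- per-entry invariant of A's queue: path = prefix-in-visited ++ [position], nodup, inside the 65-square universe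
def AEntry (kn ki : String) (visited : List String) (e : String × List String) : Prop :=
  (∃ q, e.2 = q ++ [e.1] ∧ ∀ y ∈ q, y ∈ visited) ∧ e.2.Nodup ∧ (∀ y ∈ e.2, y ∈ univL kn)
    ∧ (e.1 ≠ ki → (get_valid_knight_moves e.1).isSome)

theorem AEntry_length_le {kn ki : String} {visited : List String} {e : String × List String}
    (h : AEntry kn ki visited e) : e.2.length ≤ 65 :=
  le_trans (nodup_length_le h.2.1 h.2.2.1) (length_univ_le kn)

theorem AEntry_mono {kn ki : String} {visited visited' : List String} {e : String × List String}
    (hsub : ∀ y ∈ visited, y ∈ visited') (h : AEntry kn ki visited e) : AEntry kn ki visited' e := by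
  obtain ⟨⟨q, hq, hqv⟩, h2, h3, h4⟩ := h
  exact ⟨⟨q, hq, fun y hy => hsub y (hqv y hy)⟩, h2, h3, h4⟩

theorem AEntry_new {kn ki x m : String} {p visited : List String}
    (hfront : AEntry kn ki visited (x, p))
    (hm : m ∈ squaresL) (hnm : m ∉ PySem.Set.add visited x) :
    AEntry kn ki (PySem.Set.add visited x) (m, p ++ [m]) := by
  obtain ⟨⟨q, hq, hqv⟩, h2, h3, -⟩ := hfront
  dsimp only at hq h2 h3
  have hpv : ∀ y ∈ p, y ∈ PySem.Set.add visited x := by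
    intro y hy
    rw [hq, List.mem_append, List.mem_singleton] at hy
    rcases hy with hy | rfl
    · exact (PySem.Set.mem_add _ _ _).mpr (Or.inl (hqv y hy))
    · exact (PySem.Set.mem_add _ _ _).mpr (Or.inr rfl)
  refine ⟨⟨p, rfl, hpv⟩, ?_, ?_, ?_⟩
  · refine List.Nodup.append h2 (List.nodup_singleton m) ?_
    intro a ha hb
    rw [List.mem_singleton] at hb
    subst hb
    exact hnm (hpv a ha)
  · intro y hy
    rw [List.mem_append, List.mem_singleton] at hy
    rcases hy with hy | rfl
    · exact h3 y hy
    · exact mem_univ_of_square hm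
  · intro _
    have := gvm_square_isSome m hm
    exact this

def measureA (queue : List (String × List String)) : Nat :=
  (queue.map (fun e => 9 ^ (66 - e.2.length))).sum

theorem measureA_append (l1 l2 : List (String × List String)) :
    measureA (l1 ++ l2) = measureA l1 + measureA l2 := by
  simp [measureA]

theorem measure_step {x : String} {p : List String} {rest : List (String × List String)}
    (hp : p.length ≤ 65) {moves : List String} (hmv : moves.length ≤ 8) (f : String → Bool) :
    measureA (rest ++ (moves.filter f).map (fun m => (m, p ++ [m]))) < measureA ((x, p) :: rest) := by
  rw [measureA_append]
  have h1 : measureA ((moves.filter f).map (fun m => (m, p ++ [m])))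
      = (moves.filter f).length * 9 ^ (66 - (p.length + 1)) := by
    unfold measureA
    rw [List.map_map]
    have : ∀ m ∈ moves.filter f, ((fun e : String × List String => 9 ^ (66 - e.2.length)) ∘ (fun m => (m, p ++ [m]))) m = 9 ^ (66 - (p.length + 1)) := by
      intro m _; simp
    rw [List.map_congr_left this, List.map_const', List.sum_replicate, smul_eq_mul]
  have h2 : measureA ((x, p) :: rest) = 9 ^ (66 - p.length) + measureA rest := by
    simp [measureA]
  rw [h1, h2]
  have hle : (moves.filter f).length ≤ 8 := le_trans (List.length_filter_le _ _) hmv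
  have hexp : 66 - p.length = (66 - (p.length + 1)) + 1 := by omega
  have : (moves.filter f).length * 9 ^ (66 - (p.length + 1)) < 9 ^ (66 - p.length) := by
    rw [hexp, pow_succ]
    have h9 : 0 < 9 ^ (66 - (p.length + 1)) := Nat.pow_pos (show 0 < 9 by norm_num)
    calc (moves.filter f).length * 9 ^ (66 - (p.length + 1)) ≤ 8 * 9 ^ (66 - (p.length + 1)) := Nat.mul_le_mul_right _ hle
      _ < 9 ^ (66 - (p.length + 1)) * 9 := by omega
  omega

theorem AEntry_step {kn ki x : String} {p : List String} {rest : List (String × List String)}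
    {visited : List String} (hq : ∀ e ∈ (x, p) :: rest, AEntry kn ki visited e)
    {moves : List String} (hh : get_valid_knight_moves x = some moves) :
    ∀ e ∈ rest ++ (moves.filter (fun m => !(PySem.Set.contains (PySem.Set.add visited x) m))).map (fun m => (m, p ++ [m])),
      AEntry kn ki (PySem.Set.add visited x) e := by
  intro e he
  rw [List.mem_append] at he
  rcases he with he | he
  · exact AEntry_mono (fun y hy => (PySem.Set.mem_add _ _ _).mpr (Or.inl hy)) (hq e (List.mem_cons_of_mem _ he))
  · rw [List.mem_map] at he
    obtain ⟨m, hm, rfl⟩ := he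
    rw [List.mem_filter] at hm
    have hms := (gvm_some_props hh).1 m hm.1
    have hnm : m ∉ PySem.Set.add visited x := by
      have := hm.2
      simpa [PySem.Set.contains_iff] using this
    exact AEntry_new (hq (x, p) List.mem_cons_self) hms hnm

-- the BFS while-loop of A (queue of (position, path); visited marked at dequeue time)
def aloop (kn ki : String) (queue : List (String × List String)) (visited : List String)
    (hq : ∀ e ∈ queue, AEntry kn ki visited e) : Option (List String) :=
  match queue, hq with
  | [], _ => none
  | (x, p) :: rest, hq =>
    if x = ki then some p
    else
      match hh : get_valid_knight_moves x with
      | none => none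
      | some moves =>
        aloop kn ki
          (rest ++ (moves.filter (fun m => !(PySem.Set.contains (PySem.Set.add visited x) m))).map (fun m => (m, p ++ [m])))
          (PySem.Set.add visited x)
          (AEntry_step hq hh)
  termination_by measureA queue
  decreasing_by
    exact measure_step (AEntry_length_le (hq (x, p) List.mem_cons_self)) (gvm_some_props hh).2 _

-- bfs_knight_to_king (the dite guard only makes the loop total: outside it the Python raises)
def bfs_knight_to_king (knight_position : String) (king_position : String) : Option (List String) :=
  if h : knight_position = king_position ∨ (get_valid_knight_moves knight_position).isSome then
    aloop knight_position king_position [(knight_position, [knight_position])] []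
      (by
        intro e he
        rw [List.mem_singleton] at he
        subst he
        refine ⟨⟨[], rfl, by simp⟩, List.nodup_singleton _, ?_, ?_⟩
        · intro y hy; rw [List.mem_singleton] at hy; exact hy ▸ self_mem_univ _
        · intro hne
          rcases h with h | h
          · exact absurd h hne
          · exact h)
  else none

-- ===== PORT B =====
-- the body of B's inner for-loop: enqueue/mark/record-parent on first discovery
def bstep (cur : String) (s : List String × PySem.Set String × PySem.Dict String String) (m : String) :
    List String × PySem.Set String × PySem.Dict String String :=
  if PySem.Set.contains s.2.1 m then s
  else (s.1 ++ [m], PySem.Set.add s.2.1 m, s.2.2.insert m cur)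

-- the sublist of moves that B's for-loop actually enqueues (first occurrences not yet visited)
def freshL (v : PySem.Set String) : List String → List String
  | [] => []
  | m :: ms => if m ∈ v then freshL v ms else m :: freshL (PySem.Set.add v m) ms

theorem bfold_eq (cur : String) : ∀ (moves : List String) (q : List String) (v : PySem.Set String)
    (par : PySem.Dict String String),
    moves.foldl (bstep cur) (q, v, par) =
      (q ++ freshL v moves, v ++ freshL v moves, (freshL v moves).foldl (fun d m => d.insert m cur) par) := by
  intro moves q v par
  induction moves generalizing q v par with
  | nil => simp [freshL]
  | cons m ms ih =>
    by_cases hm : m ∈ v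
    · have hc : PySem.Set.contains v m = true := by
        simpa [PySem.Set.contains_iff] using hm
      rw [List.foldl_cons, show bstep cur (q, v, par) m = (q, v, par) from by simp [bstep, hc, hm],
        freshL, if_pos hm]
      exact ih q v par
    · have hc : PySem.Set.contains v m = false := by
        simp [PySem.Set.contains_iff]
        simpa using hm
      rw [List.foldl_cons,
        show bstep cur (q, v, par) m = (q ++ [m], PySem.Set.add v m, par.insert m cur) from by
          simp [bstep, hc, hm],
        freshL, if_neg hm]
      rw [ih (q ++ [m]) (PySem.Set.add v m) (par.insert m cur)]
      rw [PySem.Set.add_of_not_mem hm]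
      simp [List.append_assoc]

theorem freshL_sub : ∀ (ms : List String) (v : PySem.Set String), ∀ m ∈ freshL v ms, m ∈ ms ∧ m ∉ v := by
  intro ms
  induction ms with
  | nil => intro v m hm; simp [freshL] at hm
  | cons a as ih =>
    intro v m hm
    rw [freshL] at hm
    split at hm
    · have := ih v m hm; exact ⟨List.mem_cons_of_mem _ this.1, this.2⟩
    · rename_i ha
      rw [List.mem_cons] at hm
      rcases hm with rfl | hm
      · exact ⟨List.mem_cons_self, ha⟩
      · have := ih (PySem.Set.add v a) m hm
        refine ⟨List.mem_cons_of_mem _ this.1, fun hv => this.2 ((PySem.Set.mem_add _ _ _).mpr (Or.inl hv))⟩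

theorem freshL_nodup : ∀ (ms : List String) (v : PySem.Set String), (freshL v ms).Nodup := by
  intro ms
  induction ms with
  | nil => intro v; simp [freshL]
  | cons a as ih =>
    intro v
    rw [freshL]
    split
    · exact ih v
    · refine List.Nodup.cons ?_ (ih (PySem.Set.add v a))
      intro hmem
      have := (freshL_sub as (PySem.Set.add v a) a hmem).2
      exact this ((PySem.Set.mem_add _ _ _).mpr (Or.inr rfl))

def BInv (kn ki : String) (queue : List String) (visited : PySem.Set String) : Prop :=
  visited.Nodup ∧ (∀ y ∈ visited, y ∈ univL kn) ∧ (∀ x ∈ queue, x ≠ ki → (get_valid_knight_moves x).isSome)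

def measureB (queue : List String) (visited : PySem.Set String) : Nat :=
  queue.length + 2 * (65 - visited.length)

theorem bstep_inv {kn ki cur : String} {rest : List String} {visited : PySem.Set String}
    {parent : PySem.Dict String String} {moves : List String}
    (hq : BInv kn ki (cur :: rest) visited) (hh : get_valid_knight_moves cur = some moves) :
    BInv kn ki (moves.foldl (bstep cur) (rest, visited, parent)).1
        (moves.foldl (bstep cur) (rest, visited, parent)).2.1 ∧
      measureB (moves.foldl (bstep cur) (rest, visited, parent)).1
          (moves.foldl (bstep cur) (rest, visited, parent)).2.1 <
        measureB (cur :: rest) visited := by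
  obtain ⟨hnd, hsub, hqe⟩ := hq
  rw [bfold_eq]
  have hfs := freshL_sub moves visited
  have hFsq : ∀ m ∈ freshL visited moves, m ∈ squaresL := by
    intro m hm
    exact (gvm_some_props hh).1 m (hfs m hm).1
  have hnd' : (visited ++ freshL visited moves).Nodup := by
    refine List.Nodup.append hnd (freshL_nodup moves visited) ?_
    intro a ha haf
    exact (hfs a haf).2 ha
  have hsub' : ∀ y ∈ visited ++ freshL visited moves, y ∈ univL kn := by
    intro y hy
    rw [List.mem_append] at hy
    rcases hy with hy | hy
    · exact hsub y hy
    · exact mem_univ_of_square (hFsq y hy)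
  have hlen : (visited ++ freshL visited moves).length ≤ 65 :=
    le_trans (nodup_length_le hnd' hsub') (length_univ_le kn)
  refine ⟨⟨hnd', hsub', ?_⟩, ?_⟩
  · intro x hx _
    rw [List.mem_append] at hx
    rcases hx with hx | hx
    · exact hqe x (List.mem_cons_of_mem _ hx) ‹_›
    · exact gvm_square_isSome x (hFsq x hx)
  · unfold measureB
    rw [List.length_append, List.length_append]
    rw [List.length_append] at hlen
    simp only [List.length_cons]
    omega

-- B's BFS while-loop: queue of bare positions; returns the parent dict when the king is dequeued
def bloop (kn ki : String) (queue : List String) (visited : PySem.Set String)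
    (parent : PySem.Dict String String) (hq : BInv kn ki queue visited) :
    Option (PySem.Dict String String) :=
  match queue, hq with
  | [], _ => none
  | cur :: rest, hq =>
    if cur = ki then some parent
    else
      match hh : get_valid_knight_moves cur with
      | none => none
      | some moves =>
        bloop kn ki (moves.foldl (bstep cur) (rest, visited, parent)).1
          (moves.foldl (bstep cur) (rest, visited, parent)).2.1
          (moves.foldl (bstep cur) (rest, visited, parent)).2.2
          (bstep_inv ⟨hq.1, hq.2.1, hq.2.2⟩ hh).1
  termination_by measureB queue visited
  decreasing_by exact (bstep_inv ⟨hq.1, hq.2.1, hq.2.2⟩ hh).2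

-- path reconstruction: follow parent pointers from the king back to the knight (fuel only for totality)
def walk (kn : String) (parent : PySem.Dict String String) : String → Nat → Option (List String)
  | _, 0 => none
  | node, f+1 =>
    if node = kn then some [node]
    else
      match parent.get? node with
      | none => none
      | some par => (walk kn parent par f).map (fun c => node :: c)

def bfs_knight_to_king_alt (knight_position : String) (king_position : String) : Option (List String) :=
  if knight_position = king_position then some [knight_position]
  else if h : (get_valid_knight_moves knight_position).isSome then
    match bloop knight_position king_position [knight_position]
        (PySem.Set.add PySem.Set.empty knight_position) PySem.Dict.empty
        ⟨List.nodup_singleton _, by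
          intro y hy
          rw [show PySem.Set.add PySem.Set.empty knight_position = [knight_position] from rfl, List.mem_singleton] at hy
          exact hy ▸ self_mem_univ _,
         by intro x hx _; rw [List.mem_singleton] at hx; exact hx ▸ h⟩ with
    | none => none
    | some parent => (walk knight_position parent king_position (parent.items.length + 1)).map List.reverse
  else none

-- ===== PRECONDITION & SPEC =====
-- Pre_ excludes exactly the inputs where A raises: knight ≠ king and knight_position is not
-- "column letter 'a'–'h' followed by a digit '0'–'9'" (then columns.index / int(...) /
-- string indexing raises).
def Pre_bfs_knight_to_king (knight_position : String) (king_position : String) : Prop :=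
  knight_position = king_position ∨
    ((knight_position.toList[0]?.any fun c => 'a' ≤ c && c ≤ 'h') = true ∧
      (knight_position.toList[1]?.any fun r => '0' ≤ r && r ≤ '9') = true)

instance (knight_position : String) (king_position : String) :
    Decidable (Pre_bfs_knight_to_king knight_position king_position) := by
  unfold Pre_bfs_knight_to_king; infer_instance

def pvWitness_bfs_knight_to_king : String × String := ("zz", "zz")

def Spec_bfs_knight_to_king (knight_position : String) (king_position : String) (out : Option (List String)) : Prop := out = bfs_knight_to_king_alt knight_position king_position
instance (knight_position : String) (king_position : String) (out : Option (List String)) : Decidable (Spec_bfs_knight_to_king knight_position king_position out) := by unfold Spec_bfs_knight_to_king; infer_instance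

-- ===== CLAIM (what is proved, stated in full; the proofs are below) =====
def Claim_equal_bfs_knight_to_king : Prop := ∀ (knight_position : String) (king_position : String), Dom_bfs_knight_to_king knight_position king_position → Pre_bfs_knight_to_king knight_position king_position → Spec_bfs_knight_to_king knight_position king_position (bfs_knight_to_king knight_position king_position)

-- ===== LEMMAS AND PROOFS =====

def digitsL : List Char := ['0','1','2','3','4','5','6','7','8','9']

theorem char_of_code_bounds {c : Char} {lo hi : Nat} (h1 : lo ≤ c.toNat) (h2 : c.toNat ≤ hi)
    (L : List Char) (hL : ∀ n, lo ≤ n → n ≤ hi → Char.ofNat n ∈ L) : c ∈ L := by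
  have := hL c.toNat h1 h2
  rwa [Char.ofNat_toNat] at this

theorem pre_gvm_isSome {kn : String}
    (h : (kn.toList[0]?.any fun c => 97 ≤ c.toNat && c.toNat ≤ 104) = true ∧
      (kn.toList[1]?.any fun r => 48 ≤ r.toNat && r.toNat ≤ 57) = true) :
    (get_valid_knight_moves kn).isSome := by
  obtain ⟨hc0, hr0⟩ := h
  rcases hl : kn.toList with _ | ⟨c, _ | ⟨r, restl⟩⟩
  · rw [hl] at hc0; simp at hc0
  · rw [hl] at hr0; simp at hr0
  rw [hl] at hc0 hr0
  simp only [List.getElem?_cons_zero, List.getElem?_cons_succ, Option.any_some,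
    Bool.and_eq_true, decide_eq_true_eq, Char.le_def] at hc0 hr0
  have hc : c ∈ columnsL :=
    char_of_code_bounds hc0.1 hc0.2 columnsL (by intro n h1 h2; interval_cases n <;> decide)
  have hr : r ∈ digitsL :=
    char_of_code_bounds hr0.1 hr0.2 digitsL (by intro n h1 h2; interval_cases n <;> decide)
  have h0 : PySem.Str.pyGet? kn 0 = some c := by
    rw [PySem.Str.pyGet?, hl, PySem.Chars.pyGet?]
    exact PySem.List.pyGet?_zero_cons c _
  have h1 : PySem.Str.pyGet? kn 1 = some r := by
    rw [PySem.Str.pyGet?, hl, PySem.Chars.pyGet?,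
      show (1 : Int) = ((0 : Nat) : Int) + 1 from rfl, PySem.List.pyGet?_cons_succ]
    simpa using PySem.List.pyGet?_zero_cons r restl
  rcases hci : PySem.List.index? columnsL c with _ | ci
  · rw [PySem.List.index?_eq_none_iff] at hci
    exact absurd hc hci
  rcases hrv : PySem.Int.ofChars? [r] with _ | rv
  · fin_cases hr <;> exact absurd hrv (by decide)
  simp only [get_valid_knight_moves, h0, hci, h1, hrv]
  simp

-- step-equation lemmas for the two loops
theorem aloop_nil (kn ki : String) (visited : List String) (hq : ∀ e ∈ ([] : List (String × List String)), AEntry kn ki visited e) :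
    aloop kn ki [] visited hq = none := by rw [aloop]

theorem aloop_cons_king (kn ki x : String) (p : List String) (rest : List (String × List String))
    (visited : List String) (hq : ∀ e ∈ (x, p) :: rest, AEntry kn ki visited e) (hx : x = ki) :
    aloop kn ki ((x, p) :: rest) visited hq = some p := by
  rw [aloop]; simp [hx]

theorem aloop_cons_step (kn ki x : String) (p : List String) (rest : List (String × List String))
    (visited : List String) (hq : ∀ e ∈ (x, p) :: rest, AEntry kn ki visited e) (hx : x ≠ ki)
    {moves : List String} (hh : get_valid_knight_moves x = some moves)
    (hq' : ∀ e ∈ rest ++ (moves.filter (fun m => !(PySem.Set.contains (PySem.Set.add visited x) m))).map (fun m => (m, p ++ [m])), AEntry kn ki (PySem.Set.add visited x) e) :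
    aloop kn ki ((x, p) :: rest) visited hq =
      aloop kn ki
        (rest ++ (moves.filter (fun m => !(PySem.Set.contains (PySem.Set.add visited x) m))).map (fun m => (m, p ++ [m])))
        (PySem.Set.add visited x) hq' := by
  rw [aloop]
  simp only [hx, if_neg, reduceIte]
  split
  · rename_i heq; rw [heq] at hh; exact absurd hh (by simp)
  · rename_i ms heq
    rw [heq] at hh
    obtain rfl := Option.some.inj hh
    rfl

theorem bloop_nil (kn ki : String) (visited : PySem.Set String) (parent : PySem.Dict String String)
    (hq : BInv kn ki [] visited) : bloop kn ki [] visited parent hq = none := by rw [bloop]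

theorem bloop_cons_king (kn ki cur : String) (rest : List String) (visited : PySem.Set String)
    (parent : PySem.Dict String String) (hq : BInv kn ki (cur :: rest) visited) (hx : cur = ki) :
    bloop kn ki (cur :: rest) visited parent hq = some parent := by
  rw [bloop]; simp [hx]

theorem bloop_cons_step (kn ki cur : String) (rest : List String) (visited : PySem.Set String)
    (parent : PySem.Dict String String) (hq : BInv kn ki (cur :: rest) visited) (hx : cur ≠ ki)
    {moves : List String} (hh : get_valid_knight_moves cur = some moves)
    (hq' : BInv kn ki (moves.foldl (bstep cur) (rest, visited, parent)).1 (moves.foldl (bstep cur) (rest, visited, parent)).2.1) :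
    bloop kn ki (cur :: rest) visited parent hq =
      bloop kn ki (moves.foldl (bstep cur) (rest, visited, parent)).1
        (moves.foldl (bstep cur) (rest, visited, parent)).2.1
        (moves.foldl (bstep cur) (rest, visited, parent)).2.2 hq' := by
  rw [bloop]
  simp only [hx, if_neg, reduceIte]
  split
  · rename_i heq; rw [heq] at hh; exact absurd hh (by simp)
  · rename_i ms heq
    rw [heq] at hh
    obtain rfl := Option.some.inj hh
    rfl

-- ---- general list/set facts used by the simulation ----

theorem ofList_filter (p : String → Bool) : ∀ l : List String,
    PySem.Set.ofList (l.filter p) = (PySem.Set.ofList l).filter p := by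
  intro l
  induction l with
  | nil => rfl
  | cons a t ih =>
    have hdisc : ∀ (s : PySem.Set String) (x : String),
        PySem.Set.discard s x = s.filter (fun y => !(y == x)) := fun _ _ => rfl
    by_cases hp : p a
    · rw [List.filter_cons_of_pos hp, PySem.Set.ofList_cons, PySem.Set.ofList_cons, ih,
        List.filter_cons_of_pos hp, hdisc, hdisc, List.filter_comm]
    · rw [List.filter_cons_of_neg (by simpa using hp), PySem.Set.ofList_cons, ih,
        List.filter_cons_of_neg (by simpa using hp), hdisc, List.filter_comm]
      have : ((PySem.Set.ofList t).filter p).filter (fun y => !(y == a)) =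
          (PySem.Set.ofList t).filter p := by
        apply List.filter_eq_self.mpr
        intro b hb
        have hbp : p b := (List.mem_filter.mp hb).2
        have : b ≠ a := fun hba => hp (hba ▸ hbp)
        simpa using this
      rw [this]

theorem ofList_append_subset {xs ys : List String} (h : ∀ y ∈ ys, y ∈ xs) :
    PySem.Set.ofList (xs ++ ys) = PySem.Set.ofList xs := by
  rw [PySem.Set.ofList_append, PySem.Set.update_eq_append_filter]
  have : (PySem.Set.ofList ys).filter (fun y => !(PySem.Set.contains (PySem.Set.ofList xs) y)) = [] := by
    apply List.filter_eq_nil_iff.mpr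
    intro y hy
    have : y ∈ xs := h y ((PySem.Set.mem_ofList _ _).mp hy)
    simp [PySem.Set.contains_iff, PySem.Set.mem_ofList, this]
  rw [this, List.append_nil]

theorem fresh_eq : ∀ (ms : List String) (v : PySem.Set String),
    freshL v ms = (PySem.Set.ofList ms).filter (fun y => !(PySem.Set.contains v y)) := by
  intro ms
  induction ms with
  | nil => intro v; rfl
  | cons a t ih =>
    intro v
    have hdisc : ∀ (s : PySem.Set String) (x : String),
        PySem.Set.discard s x = s.filter (fun y => !(y == x)) := fun _ _ => rfl
    by_cases ha : a ∈ v
    · have hca : PySem.Set.contains v a = true := by simpa [PySem.Set.contains_iff] using ha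
      rw [freshL, if_pos ha, ih, PySem.Set.ofList_cons, List.filter_cons_of_neg (by simp [hca, ha]),
        hdisc, List.filter_comm]
      have : ((PySem.Set.ofList t).filter (fun y => !(PySem.Set.contains v y))).filter
          (fun y => !(y == a)) = (PySem.Set.ofList t).filter (fun y => !(PySem.Set.contains v y)) := by
        apply List.filter_eq_self.mpr
        intro b hb
        have hbp := (List.mem_filter.mp hb).2
        have : b ≠ a := by
          intro hba
          subst hba
          rw [hca] at hbp
          simp at hbp
        simpa using this
      rw [this]
    · have hca : PySem.Set.contains v a = false := by
        simp [PySem.Set.contains_iff]; simpa using ha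
      rw [freshL, if_neg ha, ih, PySem.Set.ofList_cons, List.filter_cons_of_pos (by simp [hca, ha]),
        hdisc, List.filter_comm]
      congr 1
      rw [List.filter_filter]
      apply List.filter_congr
      intro b _
      have : PySem.Set.contains (PySem.Set.add v a) b = (PySem.Set.contains v b || b == a) := by
        rcases eq_or_ne b a with rfl | hba
        · simp [PySem.Set.contains_iff, (PySem.Set.mem_add v a b).mpr (Or.inr rfl)]
        · by_cases hbv : b ∈ v
          · simp [PySem.Set.contains_iff, (PySem.Set.mem_add v a b).mpr (Or.inl hbv), hbv]
          · have : b ∉ PySem.Set.add v a := by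
              intro hmem
              rcases (PySem.Set.mem_add v a b).mp hmem with h | h
              · exact hbv h
              · exact hba h
            simp [PySem.Set.contains_iff, this, hbv, hba]
      simp only [this]
      cases PySem.Set.contains v b <;> cases hba : (b == a) <;> simp

theorem freshL_mem_iff {v : PySem.Set String} {ms : List String} {y : String} :
    y ∈ freshL v ms ↔ y ∈ ms ∧ y ∉ v := by
  rw [fresh_eq, List.mem_filter, PySem.Set.mem_ofList]
  constructor
  · rintro ⟨h1, h2⟩
    refine ⟨h1, ?_⟩
    simpa [PySem.Set.contains_iff] using h2
  · rintro ⟨h1, h2⟩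
    refine ⟨h1, ?_⟩
    simpa [PySem.Set.contains_iff] using h2

-- ---- path-reconstruction facts ----

theorem walk_mono (kn : String) (par : PySem.Dict String String) :
    ∀ (f f' : Nat) (x : String) (c : List String), f ≤ f' →
      walk kn par x f = some c → walk kn par x f' = some c := by
  intro f
  induction f with
  | zero => intro f' x c _ h; simp [walk] at h
  | succ f ih =>
    intro f' x c hle h
    obtain ⟨f'', rfl⟩ : ∃ f'', f' = f'' + 1 := ⟨f' - 1, by omega⟩
    rw [walk] at h
    rw [walk]
    by_cases hx : x = kn
    · rw [if_pos hx] at h; rw [if_pos hx]; exact h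
    · rw [if_neg hx] at h; rw [if_neg hx]
      rcases hg : par.get? x with _ | y
      · rw [hg] at h; exact absurd h (by simp)
      · rw [hg] at h
        rw [Option.map_eq_some_iff] at h
        obtain ⟨c', hc', rfl⟩ := h
        rw [Option.map_eq_some_iff]
        exact ⟨c', ih f'' y c' (by omega) hc', rfl⟩

theorem walk_insert_fresh {kn k v : String} {par : PySem.Dict String String}
    (hk : par.contains k = false) :
    ∀ (f : Nat) (x : String) (c : List String),
      walk kn par x f = some c → walk kn (par.insert k v) x f = some c := by
  intro f
  induction f with
  | zero => intro x c h; simp [walk] at h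
  | succ f ih =>
    intro x c h
    rw [walk] at h
    rw [walk]
    by_cases hx : x = kn
    · rw [if_pos hx] at h; rw [if_pos hx]; exact h
    · rw [if_neg hx] at h; rw [if_neg hx]
      rcases hg : par.get? x with _ | y
      · rw [hg] at h; exact absurd h (by simp)
      · have hxk : x ≠ k := by
          intro rfl_eq
          subst rfl_eq
          rw [PySem.Dict.contains_eq_isSome_get?, hg] at hk
          simp at hk
        rw [hg] at h
        rw [PySem.Dict.get?_insert_of_ne _ _ hxk, hg]
        rw [Option.map_eq_some_iff] at h ⊢
        obtain ⟨c', hc', rfl⟩ := h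
        exact ⟨c', ih y c' hc', rfl⟩

theorem walk_foldl_fresh {kn cur : String} :
    ∀ (L : List String) (par : PySem.Dict String String), L.Nodup →
      (∀ a ∈ L, par.contains a = false) →
      ∀ (f : Nat) (x : String) (c : List String), walk kn par x f = some c →
        walk kn (L.foldl (fun d m => d.insert m cur) par) x f = some c := by
  intro L
  induction L with
  | nil => intro par _ _ f x c h; exact h
  | cons a t ih =>
    intro par hnd hfr f x c h
    rw [List.foldl_cons]
    refine ih (par.insert a cur) hnd.of_cons ?_ f x c (walk_insert_fresh (hfr a List.mem_cons_self) f x c h)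
    intro b hb
    have hba : b ≠ a := fun hba => (List.nodup_cons.mp hnd).1 (hba ▸ hb)
    rw [PySem.Dict.contains_insert]
    simp [hba, hfr b (List.mem_cons_of_mem _ hb)]

theorem foldl_insert_get_of_not_mem {cur m : String} :
    ∀ (L : List String) (par : PySem.Dict String String), m ∉ L →
      (L.foldl (fun d a => d.insert a cur) par).get? m = par.get? m := by
  intro L
  induction L with
  | nil => intro par _; rfl
  | cons a t ih =>
    intro par hm
    rw [List.foldl_cons, ih (par.insert a cur) (fun h => hm (List.mem_cons_of_mem _ h)),
      PySem.Dict.get?_insert_of_ne _ _ (fun h => hm (by rw [h]; exact List.mem_cons_self))]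

theorem foldl_insert_get_of_mem {cur m : String} :
    ∀ (L : List String) (par : PySem.Dict String String), L.Nodup → m ∈ L →
      (L.foldl (fun d a => d.insert a cur) par).get? m = some cur := by
  intro L
  induction L with
  | nil => intro par _ hm; simp at hm
  | cons a t ih =>
    intro par hnd hm
    rw [List.mem_cons] at hm
    rcases hm with rfl | hm
    · rw [List.foldl_cons, foldl_insert_get_of_not_mem t _ (List.nodup_cons.mp hnd).1,
        PySem.Dict.get?_insert_self]
    · exact ih (par.insert a cur) hnd.of_cons hm

theorem foldl_insert_contains {cur k : String} :
    ∀ (L : List String) (par : PySem.Dict String String),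
      (L.foldl (fun d a => d.insert a cur) par).contains k = true →
      k ∈ L ∨ par.contains k = true := by
  intro L
  induction L with
  | nil => intro par h; exact Or.inr h
  | cons a t ih =>
    intro par h
    rw [List.foldl_cons] at h
    rcases ih (par.insert a cur) h with h1 | h1
    · exact Or.inl (List.mem_cons_of_mem _ h1)
    · rw [PySem.Dict.contains_insert] at h1
      rcases Bool.or_eq_true_iff.mp h1 with h2 | h2
      · exact Or.inl (by rw [List.mem_cons]; exact Or.inl (by simpa using h2))
      · exact Or.inr h2

theorem foldl_insert_items_length {cur : String} :
    ∀ (L : List String) (par : PySem.Dict String String), L.Nodup →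
      (∀ a ∈ L, par.contains a = false) →
      (L.foldl (fun d a => d.insert a cur) par).items.length = par.items.length + L.length := by
  intro L
  induction L with
  | nil => intro par _ _; rfl
  | cons a t ih =>
    intro par hnd hfr
    rw [List.foldl_cons, ih (par.insert a cur) hnd.of_cons ?fresh]
    · rw [PySem.Dict.items_insert_of_not_contains _ _ (hfr a List.mem_cons_self)]
      simp [List.length_append]
      omega
    case fresh =>
      intro b hb
      rw [PySem.Dict.contains_insert]
      have hba : b ≠ a := fun hba => (List.nodup_cons.mp hnd).1 (hba ▸ hb)
      simp [hba, hfr b (List.mem_cons_of_mem _ hb)]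

-- ---- the simulation relation between A's state and B's state ----

def posF (qa : List (String × List String)) (v : List String) : List String :=
  (qa.map Prod.fst).filter (fun x => !(PySem.Set.contains v x))

def SimR (kn ki : String) (queueA : List (String × List String)) (visitedA : List String)
    (queueB : List String) (visitedB : PySem.Set String) (parent : PySem.Dict String String) : Prop :=
  queueB = PySem.Set.ofList (posF queueA visitedA)
  ∧ (∀ y, y ∈ visitedB ↔ (y ∈ visitedA ∨ y ∈ queueA.map Prod.fst))
  ∧ ki ∉ visitedA
  ∧ (∀ y ∈ visitedA, ∀ moves, get_valid_knight_moves y = some moves →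
      ∀ m ∈ moves, m ∈ visitedA ∨ m ∈ queueA.map Prod.fst)
  ∧ (∀ x ∈ queueB, ∃ pth, queueA.find? (fun e => e.1 == x) = some (x, pth) ∧
      walk kn parent x (parent.items.length + 1) = some pth.reverse)
  ∧ (∀ k, parent.contains k = true → k ∈ visitedB)
  ∧ kn ∈ visitedB

theorem find?_append_left {l1 l2 : List (String × List String)} {p : String × List String → Bool}
    (h : (List.find? p l1).isSome) : List.find? p (l1 ++ l2) = List.find? p l1 := by
  rw [List.find?_append]
  obtain ⟨v, hv⟩ := Option.isSome_iff_exists.mp h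
  rw [hv]; rfl

theorem find?_map_pair {x : String} {pp : List String} : ∀ {ms : List String}, x ∈ ms →
    List.find? (fun e => e.1 == x) (ms.map (fun m => (m, pp ++ [m]))) = some (x, pp ++ [x]) := by
  intro ms
  induction ms with
  | nil => intro h; simp at h
  | cons a t ih =>
    intro h
    rw [List.map_cons]
    by_cases hax : a = x
    · subst hax
      rw [List.find?_cons_of_pos (by simp)]
    · rw [List.find?_cons_of_neg (by simpa using hax)]
      rw [List.mem_cons] at h
      exact ih (h.resolve_left (fun hh => hax hh.symm))

theorem contains_append_singleton (v : List String) (x y : String) :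
    PySem.Set.contains (v ++ [x]) y = (PySem.Set.contains v y || y == x) := by
  by_cases hy : y ∈ v
  · have : y ∈ v ++ [x] := List.mem_append_left _ hy
    simp [PySem.Set.contains_iff, this, hy]
  · by_cases hyx : y = x
    · subst hyx
      have : y ∈ v ++ [y] := List.mem_append_right _ (List.mem_singleton.mpr rfl)
      simp [PySem.Set.contains_iff, this, hy]
    · have : y ∉ v ++ [x] := by
        intro hmem
        rcases List.mem_append.mp hmem with h | h
        · exact hy h
        · exact hyx (List.mem_singleton.mp h)
      simp [PySem.Set.contains_iff, this, hy, hyx]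

theorem mem_queueB_props {kn ki : String} {queueA : List (String × List String)}
    {visitedA queueB : List String} {visitedB : PySem.Set String} {parent : PySem.Dict String String}
    (hR : SimR kn ki queueA visitedA queueB visitedB parent) {y : String} (hy : y ∈ queueB) :
    y ∈ queueA.map Prod.fst ∧ y ∉ visitedA := by
  obtain ⟨hR1, -⟩ := hR
  rw [hR1, PySem.Set.mem_ofList] at hy
  have h1 := List.mem_filter.mp hy
  refine ⟨h1.1, ?_⟩
  have := h1.2
  simpa [PySem.Set.contains_iff] using this

theorem posF_append (l1 l2 : List (String × List String)) (v : List String) :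
    posF (l1 ++ l2) v = posF l1 v ++ posF l2 v := by
  rw [posF, List.map_append, List.filter_append]; rfl

theorem sim_junk {kn ki x : String} {p : List String} {rest : List (String × List String)}
    {visitedA queueB : List String} {visitedB : PySem.Set String}
    {parent : PySem.Dict String String} {moves : List String}
    (hR : SimR kn ki ((x, p) :: rest) visitedA queueB visitedB parent)
    (hxv : x ∈ visitedA) (hh : get_valid_knight_moves x = some moves) :
    SimR kn ki
      (rest ++ (moves.filter (fun m => !(PySem.Set.contains (PySem.Set.add visitedA x) m))).map (fun m => (m, p ++ [m])))
      (PySem.Set.add visitedA x) queueB visitedB parent := by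
  obtain ⟨hR1, hR2, hR3, hR4, hR5, hR6, hR7⟩ := hR
  have hadd : PySem.Set.add visitedA x = visitedA := PySem.Set.add_of_mem hxv
  rw [hadd]
  set ms := moves.filter (fun m => !(PySem.Set.contains visitedA m)) with hms
  have hcx : PySem.Set.contains visitedA x = true := by simp [PySem.Set.contains_iff, hxv]
  -- every retained move already occurs undequeued in rest
  have hkey : ∀ m ∈ ms, m ∈ posF rest visitedA := by
    intro m hm
    have h1 := List.mem_filter.mp hm
    have hmnv : m ∉ visitedA := by simpa [PySem.Set.contains_iff] using h1.2
    have := hR4 x hxv moves hh m h1.1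
    rcases this with h | h
    · exact absurd h hmnv
    · rw [List.map_cons, List.mem_cons] at h
      rcases h with rfl | h
      · exact absurd hxv hmnv
      · exact List.mem_filter.mpr ⟨h, h1.2⟩
  have hposnew : posF ((moves.filter (fun m => !(PySem.Set.contains visitedA m))).map (fun m => (m, p ++ [m]))) visitedA = ms := by
    rw [posF, List.map_map]
    have : (Prod.fst ∘ fun m => (m, p ++ [m])) = (id : String → String) := rfl
    rw [this, List.map_id]
    rw [← hms]
    apply List.filter_eq_self.mpr
    intro b hb
    exact (List.mem_filter.mp hb).2
  have hposA : posF ((x, p) :: rest) visitedA = posF rest visitedA := by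
    rw [posF, List.map_cons, List.filter_cons_of_neg (by simp [hxv])]
    rfl
  have hpos' : posF (rest ++ (moves.filter (fun m => !(PySem.Set.contains visitedA m))).map (fun m => (m, p ++ [m]))) visitedA
      = posF rest visitedA ++ ms := by
    rw [posF_append, hposnew]
  refine ⟨?_, ?_, hR3, ?_, ?_, hR6, hR7⟩
  · -- R1
    rw [hpos', ofList_append_subset hkey, hR1, hposA]
  · -- R2
    intro y
    rw [hR2 y]
    constructor
    · rintro (h | h)
      · exact Or.inl h
      · rw [List.map_cons, List.mem_cons] at h
        rcases h with rfl | h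
        · exact Or.inl hxv
        · exact Or.inr (by rw [List.map_append, List.mem_append]; exact Or.inl h)
    · rintro (h | h)
      · exact Or.inl h
      · rw [List.map_append, List.mem_append] at h
        rcases h with h | h
        · exact Or.inr (by rw [List.map_cons, List.mem_cons]; exact Or.inr h)
        · have : y ∈ ms := by
            rw [List.map_map] at h
            simpa using h
          have := hkey y this
          have : y ∈ rest.map Prod.fst := (List.mem_filter.mp this).1
          exact Or.inr (by rw [List.map_cons, List.mem_cons]; exact Or.inr this)
  · -- R4
    intro y hy mvs hmvs m hm
    rcases hR4 y hy mvs hmvs m hm with h | h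
    · exact Or.inl h
    · rw [List.map_cons, List.mem_cons] at h
      rcases h with rfl | h
      · exact Or.inl hxv
      · exact Or.inr (by rw [List.map_append, List.mem_append]; exact Or.inl h)
  · -- R5
    intro x' hx'
    obtain ⟨pth, hfind, hwalk⟩ := hR5 x' hx'
    have hx'nv : x' ∉ visitedA := (mem_queueB_props ⟨hR1, hR2, hR3, hR4, hR5, hR6, hR7⟩ hx').2
    have hx'x : x' ≠ x := fun h => hx'nv (h ▸ hxv)
    rw [List.find?_cons_of_neg (by simpa using fun h => hx'x h.symm)] at hfind
    refine ⟨pth, ?_, hwalk⟩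
    rw [find?_append_left (by rw [hfind]; rfl)]
    exact hfind

theorem sim_first {kn ki x : String} {p : List String} {rest : List (String × List String)}
    {visitedA queueB restB : List String} {visitedB : PySem.Set String}
    {parent : PySem.Dict String String} {moves : List String}
    (hR : SimR kn ki ((x, p) :: rest) visitedA queueB visitedB parent)
    (hxv : x ∉ visitedA) (hxki : x ≠ ki) (hh : get_valid_knight_moves x = some moves)
    (hrB : restB = PySem.Set.discard (PySem.Set.ofList (posF rest visitedA)) x) :
    SimR kn ki
      (rest ++ (moves.filter (fun m => !(PySem.Set.contains (PySem.Set.add visitedA x) m))).map (fun m => (m, p ++ [m])))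
      (PySem.Set.add visitedA x)
      (restB ++ freshL visitedB moves)
      (visitedB ++ freshL visitedB moves)
      ((freshL visitedB moves).foldl (fun d m => d.insert m x) parent) := by
  obtain ⟨hR1, hR2, hR3, hR4, hR5, hR6, hR7⟩ := hR
  have hvA' : PySem.Set.add visitedA x = visitedA ++ [x] := PySem.Set.add_of_not_mem hxv
  have hxB : x ∈ visitedB := (hR2 x).mpr (Or.inr (by rw [List.map_cons]; exact List.mem_cons_self))
  set F := freshL visitedB moves with hF
  have hFiff : ∀ y, y ∈ F ↔ y ∈ moves ∧ y ∉ visitedB := fun y => freshL_mem_iff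
  have hFnodup : F.Nodup := freshL_nodup moves visitedB
  have hparfresh : ∀ a ∈ F, parent.contains a = false := by
    intro a ha
    by_contra hcon
    have : parent.contains a = true := by
      cases hp : parent.contains a
      · exact absurd hp hcon
      · rfl
    exact ((hFiff a).mp ha).2 (hR6 a this)
  have hqBx : queueB = x :: restB := by
    rw [hR1, posF, List.map_cons, List.filter_cons_of_pos (by simp [PySem.Set.contains_iff, hxv]),
      PySem.Set.ofList_cons, hrB]
    rfl
  set ms := moves.filter (fun m => !(PySem.Set.contains (PySem.Set.add visitedA x) m)) with hms
  have hmsiff : ∀ y, y ∈ ms ↔ y ∈ moves ∧ y ∉ visitedA ∧ y ≠ x := by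
    intro y
    rw [hms, List.mem_filter, hvA']
    constructor
    · rintro ⟨h1, h2⟩
      have : y ∉ visitedA ++ [x] := by simpa [PySem.Set.contains_iff] using h2
      exact ⟨h1, fun hv => this (List.mem_append_left _ hv), fun hx => this (List.mem_append_right _ (by simp [hx]))⟩
    · rintro ⟨h1, h2, h3⟩
      refine ⟨h1, ?_⟩
      have : y ∉ visitedA ++ [x] := by
        intro hmem
        rcases List.mem_append.mp hmem with h | h
        · exact h2 h
        · exact h3 (List.mem_singleton.mp h)
      simpa [PySem.Set.contains_iff] using this
  have hrBiff : ∀ y, y ∈ restB ↔ y ∈ rest.map Prod.fst ∧ y ∉ visitedA ∧ y ≠ x := by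
    intro y
    rw [hrB, PySem.Set.mem_discard, PySem.Set.mem_ofList, posF, List.mem_filter]
    constructor
    · rintro ⟨⟨h1, h2⟩, h3⟩
      exact ⟨h1, by simpa [PySem.Set.contains_iff] using h2, h3⟩
    · rintro ⟨h1, h2, h3⟩
      exact ⟨⟨h1, by simpa [PySem.Set.contains_iff] using h2⟩, h3⟩
  have hvBiff : ∀ y, y ∈ visitedB ↔ y ∈ visitedA ∨ y = x ∨ y ∈ rest.map Prod.fst := by
    intro y
    rw [hR2 y, List.map_cons, List.mem_cons]
  have hposnew : posF (ms.map (fun m => (m, p ++ [m]))) (PySem.Set.add visitedA x) = ms := by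
    rw [posF, List.map_map]
    rw [show (Prod.fst ∘ fun m => (m, p ++ [m])) = (id : String → String) from rfl, List.map_id]
    apply List.filter_eq_self.mpr
    intro b hb
    rw [hms] at hb
    exact (List.mem_filter.mp hb).2
  have hpos' : posF (rest ++ ms.map (fun m => (m, p ++ [m]))) (PySem.Set.add visitedA x)
      = posF rest (PySem.Set.add visitedA x) ++ ms := by
    rw [posF_append, hposnew]
  refine ⟨?_, ?_, ?_, ?_, ?_, ?_, ?_⟩
  · -- R1
    rw [hpos']
    have hstep2 : posF rest (PySem.Set.add visitedA x) = (posF rest visitedA).filter (fun y => !(y == x)) := by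
      rw [hvA', posF, posF, List.filter_filter]
      apply List.filter_congr
      intro y _
      rw [contains_append_singleton]
      cases PySem.Set.contains visitedA y <;> cases hyx : (y == x) <;> simp
    rw [hstep2, PySem.Set.ofList_append, PySem.Set.update_eq_append_filter, ofList_filter]
    have hXrB : (PySem.Set.ofList (posF rest visitedA)).filter (fun y => !(y == x)) = restB := by
      rw [hrB]; rfl
    rw [hXrB]
    congr 1
    rw [hF, fresh_eq, hms, ofList_filter, List.filter_filter]
    apply List.filter_congr
    intro y _
    by_cases hyv : y ∈ visitedA
    · have c1 : PySem.Set.contains visitedB y = true := by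
        simp [PySem.Set.contains_iff, (hvBiff y).mpr (Or.inl hyv)]
      have c2 : PySem.Set.contains (PySem.Set.add visitedA x) y = true := by
        rw [hvA']; simp [PySem.Set.contains_iff, List.mem_append_left _ hyv]
      rw [c1, c2]; simp
    · by_cases hyx : y = x
      · have c1 : PySem.Set.contains visitedB y = true := by
          simp [PySem.Set.contains_iff, (hvBiff y).mpr (Or.inr (Or.inl hyx))]
        have c2 : PySem.Set.contains (PySem.Set.add visitedA x) y = true := by
          rw [hvA']; simp [PySem.Set.contains_iff, List.mem_append_right _ (by simp [hyx] : y ∈ [x])]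
        rw [c1, c2]; simp
      · have c2 : PySem.Set.contains (PySem.Set.add visitedA x) y = false := by
          rw [hvA']
          have : y ∉ visitedA ++ [x] := by
            intro hmem
            rcases List.mem_append.mp hmem with h | h
            · exact hyv h
            · exact hyx (List.mem_singleton.mp h)
          simp [PySem.Set.contains_iff, this]
        by_cases hyr : y ∈ rest.map Prod.fst
        · have c1 : PySem.Set.contains visitedB y = true := by
            simp [PySem.Set.contains_iff, (hvBiff y).mpr (Or.inr (Or.inr hyr))]
          have c3 : PySem.Set.contains restB y = true := by
            simp [PySem.Set.contains_iff, (hrBiff y).mpr ⟨hyr, hyv, hyx⟩]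
          rw [c1, c2, c3]; simp
        · have c1 : PySem.Set.contains visitedB y = false := by
            have : y ∉ visitedB := fun hc => by
              rcases (hvBiff y).mp hc with h | h | h
              · exact hyv h
              · exact hyx h
              · exact hyr h
            simp [PySem.Set.contains_iff, this]
          have c3 : PySem.Set.contains restB y = false := by
            have : y ∉ restB := fun hc => hyr ((hrBiff y).mp hc).1
            simp [PySem.Set.contains_iff, this]
          rw [c1, c2, c3]; simp
  · -- R2
    intro y
    rw [List.mem_append, hvA', List.map_append, List.map_map]
    rw [show (Prod.fst ∘ fun m => (m, p ++ [m])) = (id : String → String) from rfl, List.map_id]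
    constructor
    · rintro (h | h)
      · rcases (hvBiff y).mp h with h1 | h1 | h1
        · exact Or.inl (List.mem_append_left _ h1)
        · exact Or.inl (List.mem_append_right _ (by simp [h1]))
        · exact Or.inr (List.mem_append_left _ h1)
      · obtain ⟨h1, h2⟩ := (hFiff y).mp h
        have hyva : y ∉ visitedA := fun hv => h2 ((hvBiff y).mpr (Or.inl hv))
        have hyx : y ≠ x := fun hx' => h2 ((hvBiff y).mpr (Or.inr (Or.inl hx')))
        exact Or.inr (List.mem_append_right _ ((hmsiff y).mpr ⟨h1, hyva, hyx⟩))
    · rintro (h | h)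
      · rcases List.mem_append.mp h with h1 | h1
        · exact Or.inl ((hvBiff y).mpr (Or.inl h1))
        · exact Or.inl ((hvBiff y).mpr (Or.inr (Or.inl (List.mem_singleton.mp h1))))
      · rcases List.mem_append.mp h with h1 | h1
        · exact Or.inl ((hvBiff y).mpr (Or.inr (Or.inr h1)))
        · obtain ⟨h1', h2', h3'⟩ := (hmsiff y).mp h1
          by_cases hyB : y ∈ visitedB
          · exact Or.inl hyB
          · exact Or.inr ((hFiff y).mpr ⟨h1', hyB⟩)
  · -- R3
    rw [hvA']
    intro hmem
    rcases List.mem_append.mp hmem with h | h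
    · exact hR3 h
    · exact hxki (List.mem_singleton.mp h).symm
  · -- R4
    intro y hy mvs hmvs m hm
    rw [hvA'] at hy
    rw [hvA', List.map_append, List.map_map]
    rw [show (Prod.fst ∘ fun m => (m, p ++ [m])) = (id : String → String) from rfl, List.map_id]
    rcases List.mem_append.mp hy with hy1 | hy1
    · rcases hR4 y hy1 mvs hmvs m hm with h | h
      · exact Or.inl (List.mem_append_left _ h)
      · rw [List.map_cons, List.mem_cons] at h
        rcases h with rfl | h
        · exact Or.inl (List.mem_append_right _ (by simp))
        · exact Or.inr (List.mem_append_left _ h)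
    · -- y = x
      have hyx : y = x := List.mem_singleton.mp hy1
      rw [hyx, hh] at hmvs
      have hmm : m ∈ moves := by rw [← Option.some.inj hmvs] at hm; exact hm
      by_cases hmv : m ∈ visitedA ++ [x]
      · exact Or.inl hmv
      · refine Or.inr (List.mem_append_right _ ((hmsiff m).mpr ⟨hmm, ?_, ?_⟩))
        · exact fun hc => hmv (List.mem_append_left _ hc)
        · exact fun hc => hmv (List.mem_append_right _ (by simp [hc]))
  · -- R5
    intro x' hx'
    have hfuel' : ((freshL visitedB moves).foldl (fun d m => d.insert m x) parent).items.length
        = parent.items.length + F.length := by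
      rw [← hF]
      exact foldl_insert_items_length F parent hFnodup hparfresh
    -- base fact: the front entry's path p is walked by the old parent dict
    obtain ⟨p0, hfind0, hwalk0⟩ := hR5 x (by rw [hqBx]; exact List.mem_cons_self)
    rw [List.find?_cons_of_pos (by simp)] at hfind0
    have hp0 : p0 = p := by
      have h := Option.some.inj hfind0
      exact ((Prod.mk.injEq _ _ _ _).mp h.symm).2
    rw [hp0] at hwalk0
    rcases List.mem_append.mp hx' with hx'r | hx'F
    · -- x' was already queued in B: its first A-entry is in rest
      have hx'QB : x' ∈ queueB := by rw [hqBx]; exact List.mem_cons_of_mem _ hx'r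
      obtain ⟨pth, hfind, hwalk⟩ := hR5 x' hx'QB
      have hx'x : x' ≠ x := ((hrBiff x').mp hx'r).2.2
      rw [List.find?_cons_of_neg (by simpa using fun h => hx'x h.symm)] at hfind
      refine ⟨pth, ?_, ?_⟩
      · rw [find?_append_left (by rw [hfind]; rfl)]
        exact hfind
      · have h1 := walk_foldl_fresh (cur := x) F parent hFnodup hparfresh _ _ _ hwalk
        exact walk_mono kn _ _ _ _ _ (by rw [hfuel']; omega) h1
    · -- x' is freshly discovered from x
      obtain ⟨hx'mv, hx'vB⟩ := (hFiff x').mp hx'F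
      have hx'va : x' ∉ visitedA := fun hv => hx'vB ((hvBiff x').mpr (Or.inl hv))
      have hx'x : x' ≠ x := fun hc => hx'vB ((hvBiff x').mpr (Or.inr (Or.inl hc)))
      have hx'r : x' ∉ rest.map Prod.fst := fun hr => hx'vB ((hvBiff x').mpr (Or.inr (Or.inr hr)))
      have hx'ms : x' ∈ ms := (hmsiff x').mpr ⟨hx'mv, hx'va, hx'x⟩
      have hfnone : List.find? (fun e => e.1 == x') rest = none := by
        rw [List.find?_eq_none]
        intro e he hpe
        exact hx'r (by
          have : e.1 = x' := by simpa using hpe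
          rw [← this]
          exact List.mem_map_of_mem he)
      refine ⟨p ++ [x'], ?_, ?_⟩
      · rw [List.find?_append, hfnone, Option.none_or]
        exact find?_map_pair hx'ms
      · have hx'kn : x' ≠ kn := fun hc => hx'vB (hc ▸ hR7)
        rw [hfuel', walk, if_neg hx'kn]
        rw [show ((freshL visitedB moves).foldl (fun d m => d.insert m x) parent).get? x'
            = some x from by rw [← hF]; exact foldl_insert_get_of_mem F parent hFnodup hx'F]
        have h1 := walk_foldl_fresh (cur := x) F parent hFnodup hparfresh _ _ _ hwalk0
        have hFlen : 1 ≤ F.length := List.length_pos_of_mem hx'F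
        have h2 := walk_mono kn _ _ (parent.items.length + F.length) _ _ (by omega) h1
        simp [h2]
  · -- R6
    intro k hk
    rcases foldl_insert_contains F parent hk with h | h
    · exact List.mem_append_right _ h
    · exact List.mem_append_left _ (hR6 k h)
  · -- R7
    exact List.mem_append_left _ hR7

theorem queueB_first {kn ki x : String} {p : List String} {rest : List (String × List String)}
    {visitedA queueB : List String} {visitedB : PySem.Set String} {parent : PySem.Dict String String}
    (hR : SimR kn ki ((x, p) :: rest) visitedA queueB visitedB parent) (hxv : x ∉ visitedA) :
    queueB = x :: PySem.Set.discard (PySem.Set.ofList (posF rest visitedA)) x := by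
  obtain ⟨hR1, -⟩ := hR
  rw [hR1, posF, List.map_cons, List.filter_cons_of_pos (by simp [hxv]),
    PySem.Set.ofList_cons]
  rfl

theorem measureA_pos (e : String × List String) (rest : List (String × List String)) :
    0 < measureA (e :: rest) := by
  unfold measureA
  rw [List.map_cons, List.sum_cons]
  have : 0 < 9 ^ (66 - e.2.length) := Nat.pow_pos (by norm_num)
  omega

theorem equiv_loop (kn ki : String) :
    ∀ (n : Nat) (queueA : List (String × List String)) (visitedA : List String)
      (hqA : ∀ e ∈ queueA, AEntry kn ki visitedA e)
      (queueB : List String) (visitedB : PySem.Set String) (parent : PySem.Dict String String)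
      (hqB : BInv kn ki queueB visitedB),
      measureA queueA ≤ n →
      SimR kn ki queueA visitedA queueB visitedB parent →
      aloop kn ki queueA visitedA hqA =
        (match bloop kn ki queueB visitedB parent hqB with
         | none => none
         | some par => (walk kn par ki (par.items.length + 1)).map List.reverse) := by
  intro n
  induction n with
  | zero =>
    intro queueA visitedA hqA queueB visitedB parent hqB hm hR
    cases queueA with
    | nil =>
      obtain ⟨hR1, -⟩ := hR
      have hqB0 : queueB = [] := by rw [hR1]; rfl
      subst hqB0
      rw [aloop_nil, bloop_nil]
    | cons e rest =>
      exact absurd hm (by have := measureA_pos e rest; omega)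
  | succ n ih =>
    intro queueA visitedA hqA queueB visitedB parent hqB hm hR
    cases queueA with
    | nil =>
      obtain ⟨hR1, -⟩ := hR
      have hqB0 : queueB = [] := by rw [hR1]; rfl
      subst hqB0
      rw [aloop_nil, bloop_nil]
    | cons e rest =>
      obtain ⟨x, p⟩ := e
      by_cases hx : x = ki
      · -- the king is dequeued: A returns its path, B reconstructs the same path
        have hxv : x ∉ visitedA := by rw [hx]; exact hR.2.2.1
        have hqBx := queueB_first hR hxv
        subst hqBx
        rw [aloop_cons_king kn ki x p rest visitedA hqA hx,
          bloop_cons_king kn ki x _ visitedB parent hqB hx]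
        obtain ⟨pth, hfind, hwalk⟩ := hR.2.2.2.2.1 x List.mem_cons_self
        rw [List.find?_cons_of_pos (by simp)] at hfind
        have hp : pth = p := ((Prod.mk.injEq _ _ _ _).mp (Option.some.inj hfind)).2.symm
        rw [hp] at hwalk
        rw [← hx]
        show some p = Option.map List.reverse (walk kn parent x (parent.items.length + 1))
        rw [hwalk]
        simp
      · have hsome := (hqA (x, p) List.mem_cons_self).2.2.2 hx
        obtain ⟨moves, hh⟩ := Option.isSome_iff_exists.mp hsome
        by_cases hxv : x ∈ visitedA
        · -- duplicate entry of an already-processed square: B does not move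
          rw [aloop_cons_step kn ki x p rest visitedA hqA hx hh (AEntry_step hqA hh)]
          have hmeas : measureA (rest ++ (moves.filter (fun m => !(PySem.Set.contains (PySem.Set.add visitedA x) m))).map (fun m => (m, p ++ [m]))) ≤ n := by
            have h1 := measure_step (x := x) (p := p) (rest := rest)
              (AEntry_length_le (hqA (x, p) List.mem_cons_self)) (gvm_some_props hh).2
              (fun m => !(PySem.Set.contains (PySem.Set.add visitedA x) m))
            omega
          exact ih _ _ (AEntry_step hqA hh) _ _ _ hqB hmeas (sim_junk hR hxv hh)
        · -- first processing of x: B dequeues x as well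
          have hqBx := queueB_first hR hxv
          subst hqBx
          rw [aloop_cons_step kn ki x p rest visitedA hqA hx hh (AEntry_step hqA hh),
            bloop_cons_step kn ki x _ visitedB parent hqB hx hh ((bstep_inv hqB hh).1)]
          have hmeas : measureA (rest ++ (moves.filter (fun m => !(PySem.Set.contains (PySem.Set.add visitedA x) m))).map (fun m => (m, p ++ [m]))) ≤ n := by
            have h1 := measure_step (x := x) (p := p) (rest := rest)
              (AEntry_length_le (hqA (x, p) List.mem_cons_self)) (gvm_some_props hh).2
              (fun m => !(PySem.Set.contains (PySem.Set.add visitedA x) m))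
            omega
          refine ih _ _ (AEntry_step hqA hh) _ _ _ ((bstep_inv hqB hh).1) hmeas ?_
          have hs := sim_first hR hxv hx hh rfl
          rw [bfold_eq]
          exact hs

-- ===== VERDICT (by name: the statement is the Claim_ definition above) =====
theorem bfs_knight_to_king_spec : Claim_equal_bfs_knight_to_king := by
  unfold Claim_equal_bfs_knight_to_king
  intro kn ki _hdom hpre
  unfold Spec_bfs_knight_to_king
  by_cases hkk : kn = ki
  · rw [bfs_knight_to_king, dif_pos (Or.inl hkk),
      aloop_cons_king kn ki kn [kn] [] [] _ hkk,
      bfs_knight_to_king_alt, if_pos hkk]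
  · have hparse := hpre.resolve_left hkk
    have hsome := pre_gvm_isSome hparse
    rw [bfs_knight_to_king, dif_pos (Or.inr hsome),
      bfs_knight_to_king_alt, if_neg hkk, dif_pos hsome]
    apply equiv_loop kn ki (measureA [(kn, [kn])])
    · exact le_refl _
    · -- the initial simulation relation
      refine ⟨?_, ?_, ?_, ?_, ?_, ?_, ?_⟩
      · rfl
      · intro y
        show y ∈ [kn] ↔ _
        simp [posF]
      · simp
      · intro y hy
        simp at hy
      · intro x hx
        have hxkn : x = kn := by simpa using hx
        subst hxkn
        refine ⟨[x], ?_, ?_⟩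
        · rw [List.find?_cons_of_pos (by simp)]
        · rw [walk]
          simp
      · intro k hk
        rw [show (PySem.Dict.empty : PySem.Dict String String).contains k = false from rfl] at hk
        exact absurd hk (by simp)
      · show kn ∈ [kn]
        simp
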